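-- pv_equiv track=rewrite | github.com/openalea-incubator/adel | adel/plantgen/dimT.py | _gen_index_phytomer_tmp_list
-- ===== SOURCE A (Python) =====
-- def _gen_index_phytomer_tmp_list(id_dim_tmp_list):
--     '''Generate the *index_phytomer* column of dimT_abs.'''
--     index_phytomer_tmp_list = []
--     i = 0
--     while i < len(id_dim_tmp_list):
--         N_phyt = int(str(int(id_dim_tmp_list[i]))[-2:])
--         new_index_phytomers = range(1, N_phyt + 1)
--         index_phytomer_tmp_list.extend(new_index_phytomers)
--         i = i + len(new_index_phytomers)
--     return index_phytomer_tmp_list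
-- ===== SOURCE B (Python) =====
-- def _gen_index_phytomer_tmp_list(id_dim_tmp_list):
--     '''Generate the *index_phytomer* column of dimT_abs.'''
--     # Pass 1: discover block sizes by slicing off each block's suffix.
--     sizes = []
--     rest = id_dim_tmp_list
--     while rest:
--         n = int(str(int(rest[0]))[-2:])
--         sizes.append(n)
--         rest = rest[n:]
--     # Pass 2: emit the 1..n index run for every block.
--     return [j for n in sizes for j in range(1, n + 1)]
-- ===== Notes on version B (the rewrite author's own statement) =====
-- stated objective: alternative
-- what changed: A is one index-jumping while loop that extends the output inline; B first discovers the block sizes by repeatedly slicing off each block's suffix (no index variable), then emits all 1..n runs in a separate flattened comprehension. Pre_ excludes exactly the inputs on which A never returns: a non-positive encoded count int(str(int(x))[-2:]) at a scanned block head makes A's while loop spin forever; elements at jumped-over positions are unconstrained.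
import Mathlib
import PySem

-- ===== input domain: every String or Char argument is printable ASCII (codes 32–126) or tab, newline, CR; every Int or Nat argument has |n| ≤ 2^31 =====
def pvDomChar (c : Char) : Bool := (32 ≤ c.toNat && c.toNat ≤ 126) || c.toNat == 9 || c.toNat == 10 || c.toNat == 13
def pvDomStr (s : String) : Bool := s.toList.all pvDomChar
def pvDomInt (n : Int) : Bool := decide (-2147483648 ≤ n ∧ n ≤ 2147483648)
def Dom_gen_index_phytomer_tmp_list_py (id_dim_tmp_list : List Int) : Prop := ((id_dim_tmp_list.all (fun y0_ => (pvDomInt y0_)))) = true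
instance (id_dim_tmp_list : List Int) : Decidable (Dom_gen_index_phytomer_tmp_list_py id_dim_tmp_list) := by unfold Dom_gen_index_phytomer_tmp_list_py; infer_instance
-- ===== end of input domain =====

-- B separates block discovery (a suffix-slicing scan producing the list of block sizes) from index
-- emission (one flattened comprehension), instead of A's single index-jumping loop that extends the
-- output inline; same cost, different decomposition (objective: alternative).

-- ===== PORT A =====

-- N_phyt = int(str(int(x))[-2:]); str(n)[-2:] always parses as an int, so the getD default is unreachable
def pvLastTwo (x : Int) : Int :=
  (PySem.Int.ofChars? (PySem.List.slice (PySem.Int.toChars x) (some (-2)) none)).getD 0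

-- the while loop of A; when the scanned N_phyt is ≤ 0 Python loops forever (range(1, N+1) is empty and
-- i never advances) — the 'else acc' branch is only a totality guard, those inputs are outside Pre_
def pvALoop (xs : List Int) (i : Nat) (acc : List Int) : List Int :=
  if h : i < xs.length then
    let n := pvLastTwo xs[i]
    let new := PySem.List.pyRange 1 (n + 1) 1
    if hpos : 0 < n then pvALoop xs (i + new.length) (acc ++ new)
    else acc
  else acc
termination_by xs.length - i
decreasing_by
  have hlen : (PySem.List.pyRange 1 (n + 1) 1).length = n.toNat := by
    simp [PySem.List.length_pyRange_one]
  rw [hlen]; omega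

def gen_index_phytomer_tmp_list_py (id_dim_tmp_list : List Int) : List Int :=
  pvALoop id_dim_tmp_list 0 []

-- ===== PORT B =====

-- pass 1 of B: the block sizes, scanning by slicing off each block ('rest = rest[n:]'); for n = 0
-- the Python loop does not advance past the block — the else branch is only a totality guard,
-- those inputs are outside Pre_
def pvSizes : List Int → List Int
  | [] => []
  | x :: t =>
    let n := pvLastTwo x
    if hp : 0 < n then n :: pvSizes (PySem.List.slice (x :: t) (some n) none)
    else [n]
termination_by l => l.length
decreasing_by
  rw [PySem.List.slice_from _ (le_of_lt hp)]
  simp only [List.length_drop, List.length_cons]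
  omega

-- pass 2 of B: [j for n in sizes for j in range(1, n + 1)]
def gen_index_phytomer_tmp_list_py_alt (id_dim_tmp_list : List Int) : List Int :=
  (pvSizes id_dim_tmp_list).flatMap (fun n => PySem.List.pyRange 1 (n + 1) 1)

-- ===== PRECONDITION & SPEC =====

-- Pre_ excludes exactly the inputs on which Python A never returns: a non-positive encoded count
-- int(str(int(x))[-2:]) at a SCANNED block head makes A's while loop spin forever (it never
-- advances); elements at jumped-over positions are unconstrained.  pvScanOKF walks the same block
-- heads (it must, to name exactly those positions) and checks each scanned count is positive; its
-- Nat argument is only a structural recursion bound, never exhausted when it starts at xs.length,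
-- since every accepted block consumes at least one element (lemma pvScanOKF_norm below).
def pvScanOKF : Nat → List Int → Bool
  | _, [] => true
  | 0, _ :: _ => false
  | f + 1, x :: t =>
    let n := pvLastTwo x
    decide (0 < n) && pvScanOKF f (PySem.List.slice (x :: t) (some n) none)

def Pre_gen_index_phytomer_tmp_list_py (id_dim_tmp_list : List Int) : Prop :=
  pvScanOKF id_dim_tmp_list.length id_dim_tmp_list = true
instance (id_dim_tmp_list : List Int) : Decidable (Pre_gen_index_phytomer_tmp_list_py id_dim_tmp_list) := by unfold Pre_gen_index_phytomer_tmp_list_py; infer_instance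

def pvWitness_gen_index_phytomer_tmp_list_py : List Int := [203, -7, 999, 104]

def Spec_gen_index_phytomer_tmp_list_py (id_dim_tmp_list : List Int) (out : List Int) : Prop := out = gen_index_phytomer_tmp_list_py_alt id_dim_tmp_list
instance (id_dim_tmp_list : List Int) (out : List Int) : Decidable (Spec_gen_index_phytomer_tmp_list_py id_dim_tmp_list out) := by unfold Spec_gen_index_phytomer_tmp_list_py; infer_instance

-- ===== CLAIM (what is proved, stated in full; the proofs are below) =====
def Claim_equal_gen_index_phytomer_tmp_list_py : Prop := ∀ (id_dim_tmp_list : List Int), Dom_gen_index_phytomer_tmp_list_py id_dim_tmp_list → Pre_gen_index_phytomer_tmp_list_py id_dim_tmp_list → Spec_gen_index_phytomer_tmp_list_py id_dim_tmp_list (gen_index_phytomer_tmp_list_py id_dim_tmp_list)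

-- ===== LEMMAS AND PROOFS =====

-- the structural bound of pvScanOKF is irrelevant once it is at least the list length
lemma pvScanOKF_succ : ∀ (f : Nat) (xs : List Int), xs.length ≤ f →
    pvScanOKF (f + 1) xs = pvScanOKF f xs := by
  intro f
  induction f with
  | zero =>
    intro xs hf
    have : xs = [] := List.eq_nil_of_length_eq_zero (by omega)
    subst this; rfl
  | succ f ih =>
    intro xs hf
    match xs with
    | [] => rfl
    | x :: t =>
      by_cases hn : 0 < pvLastTwo x
      · have hs : PySem.List.slice (x :: t) (some (pvLastTwo x)) none
            = (x :: t).drop (pvLastTwo x).toNat := PySem.List.slice_from _ (le_of_lt hn)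
        have hlt : ((x :: t).drop (pvLastTwo x).toNat).length ≤ f := by
          simp only [List.length_drop, List.length_cons]
          simp only [List.length_cons] at hf
          omega
        simp only [pvScanOKF, hs]
        rw [ih _ hlt]
      · simp [pvScanOKF, hn]

lemma pvScanOKF_norm : ∀ (f : Nat) (xs : List Int), xs.length ≤ f →
    pvScanOKF f xs = pvScanOKF xs.length xs := by
  intro f
  induction f with
  | zero =>
    intro xs hf
    have : xs = [] := List.eq_nil_of_length_eq_zero (by omega)
    subst this; rfl
  | succ f ih =>
    intro xs hf
    by_cases hc : xs.length ≤ f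
    · rw [pvScanOKF_succ f xs hc, ih xs hc]
    · have : xs.length = f + 1 := by omega
      rw [this]

-- loop invariant: from any position i whose suffix scans cleanly, A's loop appends exactly the
-- flattened index runs of the blocks that B's size scan finds in the suffix xs.drop i
lemma pvALoop_eq (xs : List Int) :
    ∀ (k i : Nat) (acc : List Int), xs.length - i ≤ k →
    pvScanOKF (xs.length - i) (xs.drop i) = true →
    pvALoop xs i acc = acc ++ (pvSizes (xs.drop i)).flatMap (fun n => PySem.List.pyRange 1 (n + 1) 1) := by
  intro k
  induction k with
  | zero =>
    intro i acc hk _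
    have h : ¬ i < xs.length := by omega
    rw [pvALoop]
    simp only [h, dif_neg, not_false_iff]
    rw [List.drop_of_length_le (by omega), pvSizes]
    simp
  | succ k ih =>
    intro i acc hk hok
    by_cases h : i < xs.length
    · have hdrop : xs.drop i = xs[i] :: xs.drop (i + 1) := List.drop_eq_getElem_cons h
      have hfi : xs.length - i = (xs.length - i - 1) + 1 := by omega
      rw [hdrop, hfi, pvScanOKF] at hok
      by_cases hpos : 0 < pvLastTwo xs[i]
      · have hlen : (PySem.List.pyRange 1 (pvLastTwo xs[i] + 1) 1).length = (pvLastTwo xs[i]).toNat := by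
          simp [PySem.List.length_pyRange_one]
        have hslice : PySem.List.slice (xs[i] :: xs.drop (i + 1)) (some (pvLastTwo xs[i])) none
            = xs.drop (i + (pvLastTwo xs[i]).toNat) := by
          rw [← hdrop, PySem.List.slice_from _ (le_of_lt hpos), List.drop_drop, Nat.add_comm]
        simp only [hpos, decide_true, Bool.true_and, hslice] at hok
        have htn : 1 ≤ (pvLastTwo xs[i]).toNat := by omega
        have hok' : pvScanOKF (xs.length - (i + (pvLastTwo xs[i]).toNat))
            (xs.drop (i + (pvLastTwo xs[i]).toNat)) = true := by
          rw [pvScanOKF_norm _ _ (by simp only [List.length_drop]; omega)] at hok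
          rwa [List.length_drop] at hok
        have hsz : pvSizes (xs.drop i)
            = pvLastTwo xs[i] :: pvSizes (xs.drop (i + (pvLastTwo xs[i]).toNat)) := by
          rw [hdrop, pvSizes]
          simp only [hpos, dif_pos]
          rw [hslice]
        rw [pvALoop]
        simp only [h, dif_pos, hpos]
        rw [hlen, ih (i + (pvLastTwo xs[i]).toNat) (acc ++ _) (by omega) hok', hsz]
        simp [List.append_assoc]
      · simp [hpos] at hok
    · rw [pvALoop]
      simp only [h, dif_neg, not_false_iff]
      rw [List.drop_of_length_le (by omega), pvSizes]
      simp

-- ===== VERDICT (by name: the statement is the Claim_ definition above) =====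
theorem gen_index_phytomer_tmp_list_py_spec : Claim_equal_gen_index_phytomer_tmp_list_py := by
  intro xs _ hpre
  unfold Spec_gen_index_phytomer_tmp_list_py gen_index_phytomer_tmp_list_py gen_index_phytomer_tmp_list_py_alt
  have h0 : pvScanOKF (xs.length - 0) (xs.drop 0) = true := by simpa using hpre
  simpa using pvALoop_eq xs xs.length 0 [] (by omega) h0
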